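-- pv_equiv track=rewrite | github.com/roberteinhaus/hass-emotionkit | custom_components/emotionkit/__init__.py | _active_fingerprint
-- ===== SOURCE A (Python) =====
-- def _active_fingerprint(subject_fps: dict[str, tuple[str, str]]) -> str:
--     """Return the match fingerprint that should be followed based on role priority.
--
--     Owner > admin (majority) > user (majority).
--     """
--     owner_fp = ""
--     admin_counts: dict[str, int] = {}
--     user_counts: dict[str, int] = {}
--
--     for fp, role in subject_fps.values():
--         if role == "owner":
--             owner_fp = fp
--         elif role == "admin":
--             admin_counts[fp] = admin_counts.get(fp, 0) + 1
--         else: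
--             user_counts[fp] = user_counts.get(fp, 0) + 1
--
--     if owner_fp:
--         return owner_fp
--
--     if admin_counts:
--         return max(admin_counts, key=admin_counts.get)  # type: ignore[arg-type]
--
--     if user_counts:
--         return max(user_counts, key=user_counts.get)  # type: ignore[arg-type]
--
--     return ""
-- ===== SOURCE B (Python) =====
-- def _active_fingerprint(subject_fps: dict[str, tuple[str, str]]) -> str:
--     """Declarative restatement: scan backwards for the last owner fp; otherwise
--     take the admin pool (or, failing that, the non-owner pool) and return the
--     fingerprint minimising (-count, first position) — the first-seen majority."""
--     entries = list(subject_fps.values())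
--     owner = next((fp for fp, role in reversed(entries) if role == "owner"), "")
--     if owner:
--         return owner
--     pool = [fp for fp, role in entries if role == "admin"] or \
--            [fp for fp, role in entries if role != "owner" and role != "admin"]
--     if not pool:
--         return ""
--     candidates = list(dict.fromkeys(pool))
--     return min(candidates, key=lambda fp: (-pool.count(fp), pool.index(fp)))
-- ===== Notes on version B (the rewrite author's own statement) =====
-- stated objective: alternative
-- what changed: A keeps a running owner variable and two incrementally-updated counter dicts in one forward pass and then takes a dict max; B never counts while scanning: it finds the owner by a backwards scan (next over reversed), builds the relevant pool with comprehensions (admin pool `or` non-owner pool), and picks the winner as min over the deduped candidates with the composite key (-pool.count(fp), pool.index(fp)).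
import Mathlib
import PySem

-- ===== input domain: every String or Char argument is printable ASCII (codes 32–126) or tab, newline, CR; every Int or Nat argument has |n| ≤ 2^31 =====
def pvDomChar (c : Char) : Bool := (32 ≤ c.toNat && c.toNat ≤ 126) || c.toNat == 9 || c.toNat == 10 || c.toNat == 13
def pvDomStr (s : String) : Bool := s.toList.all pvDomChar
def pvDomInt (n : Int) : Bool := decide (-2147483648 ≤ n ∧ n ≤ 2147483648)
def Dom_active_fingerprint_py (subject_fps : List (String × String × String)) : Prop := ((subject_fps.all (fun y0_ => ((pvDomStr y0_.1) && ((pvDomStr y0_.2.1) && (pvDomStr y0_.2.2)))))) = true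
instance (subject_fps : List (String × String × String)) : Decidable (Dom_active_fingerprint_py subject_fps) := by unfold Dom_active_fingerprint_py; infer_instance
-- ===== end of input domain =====

-- B restates the task declaratively: a backwards scan finds the last owner fp; otherwise the
-- admin pool (or, failing that, the non-owner pool) yields its first-seen majority as the
-- fingerprint minimising (-count, first position) — no incremental counter dicts (objective: alternative).


-- ===== PORT A =====
-- loop body: owner fp overwrites, admin/user fps are tallied into counter dicts
def pvStepA (st : String × PySem.Dict String Int × PySem.Dict String Int)
    (v : String × String) : String × PySem.Dict String Int × PySem.Dict String Int :=
  if v.2 == "owner" then (v.1, st.2.1, st.2.2)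
  else if v.2 == "admin" then (st.1, st.2.1.modify v.1 0 (· + 1), st.2.2)
  else (st.1, st.2.1, st.2.2.modify v.1 0 (· + 1))

def pvLoopA (vals : List (String × String)) :
    String × PySem.Dict String Int × PySem.Dict String Int :=
  vals.foldl pvStepA ("", PySem.Dict.empty, PySem.Dict.empty)

def pvFinishA (st : String × PySem.Dict String Int × PySem.Dict String Int) : String :=
  if st.1 ≠ "" then st.1
  else if st.2.1.size ≠ 0 then
    -- max(admin_counts, key=admin_counts.get): every key of the dict is present, so .get k computes getD k 0
    (PySem.List.max? st.2.1.keys (fun k => st.2.1.getD k 0)).getD ""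
  else if st.2.2.size ≠ 0 then
    (PySem.List.max? st.2.2.keys (fun k => st.2.2.getD k 0)).getD ""
  else ""

-- the dict parameter: association list → Python dict (duplicate keys overwrite in place) via PySem.Dict.ofList
def active_fingerprint_py (subject_fps : List (String × String × String)) : String :=
  pvFinishA (pvLoopA (PySem.Dict.ofList subject_fps).values)

-- ===== PORT B =====
-- next((fp for fp, role in reversed(entries) if role == "owner"), "");
-- then pool = admin comprehension `or` non-owner/non-admin comprehension, candidates =
-- list(dict.fromkeys(pool)) (PySem.List.dedup), winner = min(candidates,
-- key=lambda fp: (-pool.count(fp), pool.index(fp))) (PySem.List.min2?, tuple key).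
-- Every candidate is in the non-empty pool, so pool.index never raises (index? is some; the
-- .getD 0 is unreached) and min is over a non-empty list (min2? is some; the .getD "" is unreached).
def active_fingerprint_py_alt (subject_fps : List (String × String × String)) : String :=
  let entries := (PySem.Dict.ofList subject_fps).values
  let owner := ((entries.reverse.find? (fun v => v.2 == "owner")).map (·.1)).getD ""
  if owner ≠ "" then owner
  else
    let poolA := (entries.filter (fun v => v.2 == "admin")).map (·.1)
    let pool := if poolA.isEmpty then
        (entries.filter (fun v => !(v.2 == "owner") && !(v.2 == "admin"))).map (·.1)
      else poolA
    if pool.isEmpty then ""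
    else
      let candidates := PySem.List.dedup pool
      (PySem.List.min2? candidates (fun fp => -((pool.count fp : Nat) : Int))
        (fun fp => (PySem.List.index? pool fp).getD 0)).getD ""

-- ===== PRECONDITION & SPEC =====
def Spec_active_fingerprint_py (subject_fps : List (String × String × String)) (out : String) : Prop := out = active_fingerprint_py_alt subject_fps
instance (subject_fps : List (String × String × String)) (out : String) : Decidable (Spec_active_fingerprint_py subject_fps out) := by unfold Spec_active_fingerprint_py; infer_instance

-- ===== CLAIM (what is proved, stated in full; the proofs are below) =====
def Claim_equal_active_fingerprint_py : Prop := ∀ (subject_fps : List (String × String × String)), Dom_active_fingerprint_py subject_fps → Spec_active_fingerprint_py subject_fps (active_fingerprint_py subject_fps)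

-- ===== LEMMAS AND PROOFS =====

-- the three role groups, as filters over the value list
def pvOwn (v : String × String) : Bool := v.2 == "owner"
def pvAdm (v : String × String) : Bool := !(v.2 == "owner") && (v.2 == "admin")
def pvUsr (v : String × String) : Bool := !(v.2 == "owner") && !(v.2 == "admin")

-- pool.index(fp) as used by B (total on members of pool)
def pvIdx (pool : List String) (fp : String) : Nat := (PySem.List.index? pool fp).getD 0

theorem pv_loopA_eq (vals : List (String × String)) (o : String)
    (da du : PySem.Dict String Int) :
    vals.foldl pvStepA (o, da, du)
    = (((vals.filter pvOwn).map (·.1)).getLastD o,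
       ((vals.filter pvAdm).map (·.1)).foldl (fun d x => d.modify x 0 (· + 1)) da,
       ((vals.filter pvUsr).map (·.1)).foldl (fun d x => d.modify x 0 (· + 1)) du) := by
  induction vals generalizing o da du with
  | nil => simp
  | cons v t ih =>
    rw [List.foldl_cons]
    by_cases h1 : v.2 = "owner"
    · have hO : pvOwn v = true := by simp [pvOwn, h1]
      have hA : ¬ pvAdm v = true := by simp [pvAdm, h1]
      have hU : ¬ pvUsr v = true := by simp [pvUsr, h1]
      rw [show pvStepA (o, da, du) v = (v.1, da, du) from by simp [pvStepA, h1], ih]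
      simp only [List.filter_cons_of_pos hO, List.filter_cons_of_neg hA,
        List.filter_cons_of_neg hU, List.map_cons, List.getLastD_cons]
    · by_cases h2 : v.2 = "admin"
      · have hO : ¬ pvOwn v = true := by simp [pvOwn, h1]
        have hA : pvAdm v = true := by simp [pvAdm, h2]
        have hU : ¬ pvUsr v = true := by simp [pvUsr, h2]
        rw [show pvStepA (o, da, du) v = (o, da.modify v.1 0 (· + 1), du) from by
              simp [pvStepA, h2], ih]
        simp only [List.filter_cons_of_neg hO, List.filter_cons_of_pos hA,
          List.filter_cons_of_neg hU, List.map_cons, List.foldl_cons]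
      · have hO : ¬ pvOwn v = true := by simp [pvOwn, h1]
        have hA : ¬ pvAdm v = true := by simp [pvAdm, h2]
        have hU : pvUsr v = true := by simp [pvUsr, h1, h2]
        rw [show pvStepA (o, da, du) v = (o, da, du.modify v.1 0 (· + 1)) from by
              simp [pvStepA, h1, h2], ih]
        simp only [List.filter_cons_of_neg hO, List.filter_cons_of_neg hA,
          List.filter_cons_of_pos hU, List.map_cons, List.foldl_cons]

theorem pv_counter_eq (l : List String) :
    l.foldl (fun (d : PySem.Dict String Int) x => d.modify x 0 (· + 1)) PySem.Dict.empty
      = PySem.Dict.counter l := rfl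

theorem pv_counter_size_ne (l : List String) :
    ((PySem.Dict.counter l).size ≠ 0) ↔ l ≠ [] := by
  unfold PySem.Dict.size
  rw [PySem.Dict.items_counter]
  cases l with
  | nil => simp [PySem.Set.ofList_nil]
  | cons x t => simp [PySem.Set.ofList_cons]

-- B's reversed-scan owner equals A's last-overwrite owner
theorem pv_owner_eq (entries : List (String × String)) :
    ((entries.reverse.find? (fun v => v.2 == "owner")).map (·.1)).getD ""
    = ((entries.filter pvOwn).map (·.1)).getLastD "" := by
  have h : entries.reverse.find? (fun v => v.2 == "owner")
      = (entries.filter pvOwn).getLast? := by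
    rw [← List.head?_filter]
    show (List.filter pvOwn entries.reverse).head? = _
    rw [List.filter_reverse, List.head?_reverse]
  rw [h, List.getLastD_eq_getLast?, ← List.getLast?_map]

theorem pv_idx_cons_ne (x b : String) (t : List String) (hbx : ¬ (x == b) = true) (k : Nat)
    (hk : List.idxOf? b t = some k) : pvIdx (x::t) b = k + 1 := by
  simp [pvIdx, PySem.List.index?, List.idxOf?_cons, hbx, hk]

theorem pv_idx_cons_self (x : String) (t : List String) : pvIdx (x::t) x = 0 := by
  simp [pvIdx, PySem.List.index?, List.idxOf?_cons]

-- first-appearance positions strictly increase along set(pool)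
theorem pv_pairwise_idx (pool : List String) :
    (PySem.Set.ofList pool).Pairwise (fun a b => pvIdx pool a < pvIdx pool b) := by
  induction pool with
  | nil => simp [PySem.Set.ofList_nil]
  | cons x t ih =>
    rw [PySem.Set.ofList_cons]
    constructor
    · intro b hb
      have hne : ¬ b = x := by simpa using List.of_mem_filter hb
      have hbx : ¬ (x == b) = true := by
        simp only [beq_iff_eq]; exact fun h => hne h.symm
      have hbt : b ∈ t := (PySem.Set.mem_ofList t b).mp (List.mem_of_mem_filter hb)
      obtain ⟨k, hk⟩ := Option.isSome_iff_exists.mp (List.isSome_idxOf?.mpr hbt)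
      rw [pv_idx_cons_self, pv_idx_cons_ne x b t hbx k hk]
      omega
    · have hsub : ((PySem.Set.ofList t).discard x).Sublist (PySem.Set.ofList t) :=
        List.filter_sublist
      refine (ih.sublist hsub).imp_of_mem ?_
      intro a b ha hb hlt
      have hnea : ¬ a = x := by simpa using List.of_mem_filter ha
      have hneb : ¬ b = x := by simpa using List.of_mem_filter hb
      have hax : ¬ (x == a) = true := by
        simp only [beq_iff_eq]; exact fun h => hnea h.symm
      have hbx : ¬ (x == b) = true := by
        simp only [beq_iff_eq]; exact fun h => hneb h.symm
      have hat : a ∈ t := (PySem.Set.mem_ofList t a).mp (List.mem_of_mem_filter ha)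
      have hbt : b ∈ t := (PySem.Set.mem_ofList t b).mp (List.mem_of_mem_filter hb)
      obtain ⟨ka, hka⟩ := Option.isSome_iff_exists.mp (List.isSome_idxOf?.mpr hat)
      obtain ⟨kb, hkb⟩ := Option.isSome_iff_exists.mp (List.isSome_idxOf?.mpr hbt)
      have hlt' : ka < kb := by simpa [pvIdx, PySem.List.index?, hka, hkb] using hlt
      rw [pv_idx_cons_ne x a t hax ka hka, pv_idx_cons_ne x b t hbx kb hkb]
      omega

-- B's min2? fold step and A's max? fold step, with pool's keys plugged in
def pvStepMin (pool : List String) (acc : Option String) (x : String) : Option String :=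
  match acc with
  | none => some x
  | some m =>
    if (decide ((-((pool.count x : Nat) : Int)) < (-((pool.count m : Nat) : Int))) ||
        !decide ((-((pool.count m : Nat) : Int)) < (-((pool.count x : Nat) : Int))) &&
        decide (pvIdx pool x < pvIdx pool m)) = true then some x else some m

def pvStepMax (pool : List String) (acc : Option String) (x : String) : Option String :=
  match acc with
  | none => some x
  | some m => if ((pool.count m : Nat) : Int) < ((pool.count x : Nat) : Int) then some x else some m

-- on a list whose first-appearance positions strictly increase, the lexicographic
-- (-count, position) min step never fires its tie-break, so it is the max-by-count step
theorem pv_fold_min_max (pool : List String) :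
    ∀ (t : List String) (m : String),
      (∀ y ∈ t, pvIdx pool m < pvIdx pool y) →
      t.Pairwise (fun a b => pvIdx pool a < pvIdx pool b) →
      t.foldl (pvStepMin pool) (some m) = t.foldl (pvStepMax pool) (some m) := by
  intro t
  induction t with
  | nil => intro m _ _; rfl
  | cons x s ih =>
    intro m hm hp
    have hmx : pvIdx pool m < pvIdx pool x := hm x List.mem_cons_self
    have hxlt : ¬ pvIdx pool x < pvIdx pool m := by omega
    have hstep : pvStepMin pool (some m) x = pvStepMax pool (some m) x := by
      simp only [pvStepMin, pvStepMax, hxlt, decide_false, Bool.and_false, Bool.or_false,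
        decide_eq_true_eq, neg_lt_neg_iff]
    rw [List.foldl_cons, List.foldl_cons, hstep]
    rcases List.pairwise_cons.mp hp with ⟨hx, hps⟩
    by_cases hc : ((pool.count m : Nat) : Int) < ((pool.count x : Nat) : Int)
    · rw [show pvStepMax pool (some m) x = some x from by simp [pvStepMax, hc]]
      exact ih x hx hps
    · rw [show pvStepMax pool (some m) x = some m from by simp [pvStepMax, hc]]
      exact ih m (fun y hy => hm y (List.mem_cons_of_mem _ hy)) hps

-- B's min over the deduped pool equals A's max over set(pool) by count
theorem pv_min_eq_max (pool : List String) (hne : pool ≠ []) :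
    (PySem.List.min2? (PySem.List.dedup pool) (fun fp => -((pool.count fp : Nat) : Int))
      (fun fp => (PySem.List.index? pool fp).getD 0)).getD ""
    = (PySem.List.max? (PySem.Set.ofList pool) (fun k => ((pool.count k : Nat) : Int))).getD "" := by
  have h1 : PySem.List.min2? (PySem.List.dedup pool) (fun fp => -((pool.count fp : Nat) : Int))
      (fun fp => (PySem.List.index? pool fp).getD 0)
      = (PySem.Set.ofList pool).foldl (pvStepMin pool) none := by
    unfold PySem.List.min2?
    congr 1
    funext acc x
    cases acc <;> rfl
  have h2 : PySem.List.max? (PySem.Set.ofList pool) (fun k => ((pool.count k : Nat) : Int))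
      = (PySem.Set.ofList pool).foldl (pvStepMax pool) none := by
    unfold PySem.List.max?
    congr 1
    funext acc x
    cases acc <;> rfl
  rw [h1, h2]
  cases hs : PySem.Set.ofList pool with
  | nil =>
    exfalso; apply hne
    cases pool with
    | nil => rfl
    | cons a t => rw [PySem.Set.ofList_cons] at hs; cases hs
  | cons c cs =>
    have hp : (c :: cs).Pairwise (fun a b => pvIdx pool a < pvIdx pool b) := by
      rw [← hs]; exact pv_pairwise_idx pool
    rcases List.pairwise_cons.mp hp with ⟨hc, hcs⟩
    rw [List.foldl_cons, List.foldl_cons,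
      show pvStepMin pool none c = some c from rfl,
      show pvStepMax pool none c = some c from rfl,
      pv_fold_min_max pool cs c hc hcs]

-- A's counter-dict max branch equals B's min over the deduped pool
theorem pv_branch (l : List String) (h : l ≠ []) :
    (PySem.List.max? (PySem.Dict.counter l).keys
      (fun k => (PySem.Dict.counter l).getD k 0)).getD ""
    = (PySem.List.min2? (PySem.List.dedup l) (fun fp => -((l.count fp : Nat) : Int))
      (fun fp => (PySem.List.index? l fp).getD 0)).getD "" := by
  rw [pv_min_eq_max l h]
  simp only [PySem.Dict.keys_counter, PySem.Dict.getD_counter]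

-- ===== VERDICT (by name: the statement is the Claim_ definition above) =====
theorem active_fingerprint_py_spec : Claim_equal_active_fingerprint_py := by
  intro subject_fps _
  unfold Spec_active_fingerprint_py active_fingerprint_py active_fingerprint_py_alt
  generalize (PySem.Dict.ofList subject_fps).values = entries
  unfold pvLoopA
  rw [pv_loopA_eq]
  unfold pvFinishA
  dsimp only
  rw [pv_counter_eq, pv_counter_eq, pv_owner_eq]
  have hAdm : entries.filter (fun v => v.2 == "admin") = entries.filter pvAdm := by
    apply List.filter_congr
    intro v _
    show (v.2 == "admin") = pvAdm v
    unfold pvAdm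
    by_cases h : v.2 = "admin" <;> simp [h]
  have hUsr : entries.filter (fun v => !(v.2 == "owner") && !(v.2 == "admin"))
      = entries.filter pvUsr := rfl
  rw [hAdm, hUsr]
  by_cases ho : ((entries.filter pvOwn).map (·.1)).getLastD "" ≠ ""
  · rw [if_pos ho, if_pos ho]
  · rw [if_neg ho, if_neg ho]
    by_cases hA : ((entries.filter pvAdm).map (·.1)) = []
    · have hAe : ((entries.filter pvAdm).map (·.1)).isEmpty = true := by simp [hA]
      rw [if_neg (fun hcon => (pv_counter_size_ne _).mp hcon hA), if_pos hAe]
      by_cases hU : ((entries.filter pvUsr).map (·.1)) = []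
      · have hUe : ((entries.filter pvUsr).map (·.1)).isEmpty = true := by simp [hU]
        rw [if_neg (fun hcon => (pv_counter_size_ne _).mp hcon hU), if_pos hUe]
      · have hUe : ¬ ((entries.filter pvUsr).map (·.1)).isEmpty = true := by
          simpa [List.isEmpty_iff] using hU
        rw [if_pos ((pv_counter_size_ne _).mpr hU), if_neg hUe]
        exact pv_branch _ hU
    · have hAe : ¬ ((entries.filter pvAdm).map (·.1)).isEmpty = true := by
        simpa [List.isEmpty_iff] using hA
      rw [if_pos ((pv_counter_size_ne _).mpr hA), if_neg hAe, if_neg hAe]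
      exact pv_branch _ hA
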